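-- pv_equiv track=rewrite | github.com/Manikanta-Reddy-Pasala/debian-package-manager | src/debian_metapackage_manager/config.py | _is_system_critical_package
-- ===== SOURCE A (Python) =====
-- def _is_system_critical_package(package_name: str) -> bool:
--     """Check if a package is system-critical and should never be removable."""
--     critical_packages = {
--         'libc6', 'bash', 'coreutils', 'util-linux', 'systemd', 'init',
--         'kernel', 'linux-image', 'grub', 'apt', 'dpkg', 'base-files',
--         'base-passwd', 'login', 'passwd', 'sudo', 'openssh-server'
--     }
--
--     # Check exact match or if it starts with critical package names
--     for critical in critical_packages:
--         if package_name == critical or package_name.startswith(f"{critical}-"):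
--             return True
--
--     return False
-- ===== SOURCE B (Python) =====
-- def _is_system_critical_package(package_name: str) -> bool:
--     critical = set(
--         "libc6 bash coreutils util-linux systemd init kernel linux-image "
--         "grub apt dpkg base-files base-passwd login passwd sudo openssh-server".split()
--     )
--     prefix = ""
--     for ch in package_name:
--         if ch == '-' and prefix in critical:
--             return True
--         prefix += ch
--     return prefix in critical
-- ===== Notes on version B (the rewrite author's own statement) =====
-- stated objective: alternative
-- what changed: Instead of scanning the 17 critical names testing equality/startswith for each, B makes one left-to-right pass over the input, growing a prefix accumulator and doing a single set-membership test at every hyphen boundary and once at the end for the full name.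
import Mathlib
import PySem

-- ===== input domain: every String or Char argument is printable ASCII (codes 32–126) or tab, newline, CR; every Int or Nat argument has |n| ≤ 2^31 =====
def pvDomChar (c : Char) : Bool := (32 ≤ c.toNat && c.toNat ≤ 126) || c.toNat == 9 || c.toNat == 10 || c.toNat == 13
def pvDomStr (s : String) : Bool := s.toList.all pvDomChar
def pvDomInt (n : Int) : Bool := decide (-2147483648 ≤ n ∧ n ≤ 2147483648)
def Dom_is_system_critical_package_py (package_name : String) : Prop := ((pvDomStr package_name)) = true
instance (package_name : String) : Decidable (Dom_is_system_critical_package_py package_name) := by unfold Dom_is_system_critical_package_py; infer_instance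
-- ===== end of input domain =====

-- B replaces A's scan of the constant critical-name set (equality/startswith per name) by a single
-- left-to-right pass growing a prefix accumulator with one set lookup per hyphen boundary; alternative, not faster.

-- ===== PORT A =====
-- the Python set literal of critical names (iterated with an 'any', so order is irrelevant)
def pvCritical : List (List Char) :=
  ["libc6".toList, "bash".toList, "coreutils".toList, "util-linux".toList, "systemd".toList,
   "init".toList, "kernel".toList, "linux-image".toList, "grub".toList, "apt".toList,
   "dpkg".toList, "base-files".toList, "base-passwd".toList, "login".toList, "passwd".toList,
   "sudo".toList, "openssh-server".toList]

-- for critical in critical_packages: if package_name == critical or package_name.startswith(f"{critical}-"): return True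
def is_system_critical_package_py (package_name : String) : Bool :=
  pvCritical.any (fun critical =>
    package_name.toList == critical ||
    PySem.Chars.startswith package_name.toList (critical ++ ['-']))

-- ===== PORT B =====
-- critical = set("libc6 bash … openssh-server".split())
def pvCriticalB : List (List Char) :=
  PySem.Set.ofList (PySem.Chars.split₀
    ("libc6 bash coreutils util-linux systemd init kernel linux-image " ++
     "grub apt dpkg base-files base-passwd login passwd sudo openssh-server").toList)

-- the loop: for ch in package_name: if ch == '-' and prefix in critical: return True; prefix += ch
-- then: return prefix in critical
def pvGoB (pref : List Char) : List Char → Bool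
  | [] => pvCriticalB.contains pref
  | c :: rest =>
      if c == '-' && pvCriticalB.contains pref then true
      else pvGoB (pref ++ [c]) rest

def is_system_critical_package_py_alt (package_name : String) : Bool :=
  pvGoB [] package_name.toList

-- ===== PRECONDITION & SPEC =====
def Spec_is_system_critical_package_py (package_name : String) (out : Bool) : Prop := out = is_system_critical_package_py_alt package_name
instance (package_name : String) (out : Bool) : Decidable (Spec_is_system_critical_package_py package_name out) := by unfold Spec_is_system_critical_package_py; infer_instance

-- ===== CLAIM (what is proved, stated in full; the proofs are below) =====
def Claim_equal_is_system_critical_package_py : Prop := ∀ (package_name : String), Dom_is_system_critical_package_py package_name → Spec_is_system_critical_package_py package_name (is_system_critical_package_py package_name)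

-- ===== LEMMAS AND PROOFS =====

-- B's runtime-built set holds exactly A's literal names
set_option maxRecDepth 4096 in
lemma pv_critB_eq : pvCriticalB = pvCritical := by decide

-- A's startswith(critical + "-") over the set ↔ some hyphen position of the input whose prefix is in the set
lemma pv_prefix_iff_hyphen (l : List Char) :
    (∃ c ∈ pvCritical, (c ++ ['-']) <+: l) ↔
    (∃ k, ∃ h : k < l.length, l[k] = '-' ∧ l.take k ∈ pvCritical) := by
  constructor
  · rintro ⟨c, hc, t, rfl⟩
    refine ⟨c.length, by simp, ?_, ?_⟩
    · simp [List.append_assoc, List.getElem_append_right]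
    · rw [List.append_assoc, List.take_left]
      exact hc
  · rintro ⟨k, hk, hm, hc⟩
    refine ⟨l.take k, hc, l.drop (k+1), ?_⟩
    have h2 : List.drop k l = '-' :: List.drop (k+1) l := by
      rw [List.drop_eq_getElem_cons hk, hm]
    rw [List.append_assoc, List.singleton_append, ← h2, List.take_append_drop]

lemma pv_A_iff (l : List Char) :
    (pvCritical.any (fun c => l == c || PySem.Chars.startswith l (c ++ ['-']))) = true ↔
    (l ∈ pvCritical ∨ ∃ k, ∃ h : k < l.length, l[k] = '-' ∧ l.take k ∈ pvCritical) := by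
  rw [List.any_eq_true]
  constructor
  · rintro ⟨c, hc, h⟩
    rcases Bool.or_eq_true_iff.mp h with h | h
    · left; exact (beq_iff_eq.mp h) ▸ hc
    · right; exact (pv_prefix_iff_hyphen l).mp ⟨c, hc, (PySem.Chars.startswith_iff _ _).mp h⟩
  · rintro (h | h)
    · exact ⟨l, h, by simp⟩
    · obtain ⟨c, hc, hp⟩ := (pv_prefix_iff_hyphen l).mpr h
      exact ⟨c, hc, by rw [Bool.or_eq_true_iff]; exact Or.inr ((PySem.Chars.startswith_iff _ _).mpr hp)⟩

-- loop invariant for B's single pass: with accumulated prefix `pref`, the pass over `l` succeeds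
-- iff the whole remaining name is critical or some hyphen of `l` closes a critical prefix
lemma pv_goB_iff (l : List Char) : ∀ pref : List Char,
    pvGoB pref l = true ↔
    (pref ++ l ∈ pvCritical ∨ ∃ k, ∃ h : k < l.length, l[k] = '-' ∧ pref ++ l.take k ∈ pvCritical) := by
  induction l with
  | nil =>
    intro pref
    simp [pvGoB, pv_critB_eq]
  | cons c t ih =>
    intro pref
    by_cases hc : c = '-' ∧ pref ∈ pvCritical
    · have : pvGoB pref (c :: t) = true := by
        simp [pvGoB, hc.1, pv_critB_eq, hc.2]
      rw [this]
      simp only [true_iff]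
      exact Or.inr ⟨0, by simp, by simpa using hc.1, by simpa using hc.2⟩
    · have hstep : pvGoB pref (c :: t) = pvGoB (pref ++ [c]) t := by
        simp only [pvGoB, pv_critB_eq]
        rw [if_neg]
        intro h
        rcases Bool.and_eq_true_iff.mp h with ⟨h1, h2⟩
        exact hc ⟨beq_iff_eq.mp h1, by simpa using h2⟩
      rw [hstep, ih]
      constructor
      · rintro (h | ⟨k, hk, hm, hp⟩)
        · left; simpa using h
        · exact Or.inr ⟨k + 1, by simpa using hk, by simpa using hm, by simpa using hp⟩
      · rintro (h | ⟨k, hk, hm, hp⟩)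
        · left; simpa using h
        · cases k with
          | zero =>
            exact absurd ⟨by simpa using hm, by simpa using hp⟩ hc
          | succ j =>
            exact Or.inr ⟨j, by simpa using hk, by simpa using hm, by simpa using hp⟩

-- ===== VERDICT (by name: the statement is the Claim_ definition above) =====
theorem is_system_critical_package_py_spec : Claim_equal_is_system_critical_package_py := by
  intro s _
  unfold Spec_is_system_critical_package_py is_system_critical_package_py is_system_critical_package_py_alt
  rw [Bool.eq_iff_iff, pv_A_iff, pv_goB_iff]
  simp
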